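-- pv_equiv track=rewrite | github.com/cs294-domotics/lstm-learner | raw/preprocessor-sampled-events-activities.py | generate_device_feature_vectors
-- ===== SOURCE A (Python) =====
-- from copy import copy, deepcopy
--
-- def generate_device_feature_vectors(input_vectors, label_vectors):
--     light_state = 0
--     vectors = deepcopy(input_vectors)
--     for (i, states) in enumerate(label_vectors):
--         vectors[i] = vectors[i] + [light_state]
--         if states[0] == 1:
--             light_state = 0
--         elif states[1] == 1:
--             light_state = 1
--     return vectors
-- ===== SOURCE B (Python) =====
-- def generate_device_feature_vectors(input_vectors, label_vectors):
--     n = len(label_vectors)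
--     # Sparse event representation: the indices where the light state is (re)set,
--     # together with the value set there.
--     events = []
--     for i, states in enumerate(label_vectors):
--         if states[0] == 1:
--             events.append((i, 0))
--         elif states[1] == 1:
--             events.append((i, 1))
--     # The carried-state sequence is piecewise constant between events:
--     # expand the events into constant runs (run-length decoding).
--     carried = []
--     value = 0
--     start = 0
--     for j, v in events:
--         carried.extend([value] * (j + 1 - start))
--         value = v
--         start = j + 1
--     carried.extend([value] * (n - start))
--     # Append positionally; vectors beyond the labelled prefix are copied untouched.
--     return [input_vectors[i] + [carried[i]] for i in range(n)] + \
--            [list(v) for v in input_vectors[n:]]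
-- ===== Notes on version B (the rewrite author's own statement) =====
-- stated objective: alternative
-- what changed: Replaces A's single stateful loop that mutates a deep copy in place with a sparse-event algorithm: extract the state-change events (index, new value), run-length-decode them into the piecewise-constant carried-state sequence, then append positionally.
import Mathlib
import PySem

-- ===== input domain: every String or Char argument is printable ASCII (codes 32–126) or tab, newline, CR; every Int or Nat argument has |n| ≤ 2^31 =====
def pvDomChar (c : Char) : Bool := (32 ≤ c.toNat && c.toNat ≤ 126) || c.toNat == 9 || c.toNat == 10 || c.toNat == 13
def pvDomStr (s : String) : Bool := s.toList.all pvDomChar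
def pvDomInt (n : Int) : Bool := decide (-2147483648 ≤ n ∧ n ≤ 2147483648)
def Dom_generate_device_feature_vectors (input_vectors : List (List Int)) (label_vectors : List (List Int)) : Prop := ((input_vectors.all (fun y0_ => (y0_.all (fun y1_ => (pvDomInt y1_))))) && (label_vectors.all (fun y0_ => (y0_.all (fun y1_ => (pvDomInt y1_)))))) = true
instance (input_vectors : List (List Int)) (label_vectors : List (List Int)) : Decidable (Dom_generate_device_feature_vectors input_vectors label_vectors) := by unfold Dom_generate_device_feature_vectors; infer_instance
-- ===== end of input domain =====

-- B replaces A's stateful in-place loop with a sparse-event algorithm: extract the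
-- state-change events, run-length-decode them into the carried-state sequence, then
-- append positionally (objective: alternative algorithm, same cost).

-- ===== PORT A =====
-- the light_state update: states[0]==1 -> 0, elif states[1]==1 -> 1
-- (getD is exact for the in-range accesses Pre_ admits; Python raises on the others)
def pvUpdA (s : Int) (states : List Int) : Int :=
  if states.getD 0 0 = 1 then 0 else if states.getD 1 0 = 1 then 1 else s

-- the for-loop over enumerate(label_vectors): index i, state light_state, mutating vectors
def pvLoopA : List (List Int) → Nat → Int → List (List Int) → List (List Int)
  | vectors, _, _, [] => vectors
  | vectors, i, s, states :: rest =>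
      pvLoopA (vectors.set i ((vectors.getD i []) ++ [s])) (i + 1) (pvUpdA s states) rest

def generate_device_feature_vectors (input_vectors : List (List Int)) (label_vectors : List (List Int)) : List (List Int) :=
  pvLoopA input_vectors 0 0 label_vectors

-- ===== PORT B =====
-- the event-extraction loop over enumerate(label_vectors)
-- (getD is exact for the in-range accesses Pre_ admits; Python raises on the others)
def pvEventsB (label_vectors : List (List Int)) : List (Int × Int) :=
  (PySem.List.enumerate label_vectors 0).foldl (fun acc p =>
    if p.2.getD 0 0 = 1 then acc ++ [(p.1, (0 : Int))]
    else if p.2.getD 1 0 = 1 then acc ++ [(p.1, (1 : Int))]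
    else acc) []

-- run-length decoding of the events into the carried-state sequence
-- (state = (carried, value, start); [value]*(j+1-start) is replicate, count ≥ 0 in Python)
def pvFillB (events : List (Int × Int)) (n : Int) : List Int :=
  let r := events.foldl (fun (st : List Int × Int × Int) e =>
    (st.1 ++ List.replicate (e.1 + 1 - st.2.2).toNat st.2.1, e.2, e.1 + 1)) ([], 0, 0)
  r.1 ++ List.replicate (n - r.2.2).toNat r.2.1

-- the two final comprehensions; input_vectors[i] and carried[i] via pyGetD
-- (exact for the in-range accesses Pre_ admits; [n:] with n ≥ 0 is drop)
def generate_device_feature_vectors_alt (input_vectors : List (List Int)) (label_vectors : List (List Int)) : List (List Int) :=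
  (PySem.List.pyRange 0 (label_vectors.length : Int) 1).map
    (fun i => PySem.List.pyGetD input_vectors i [] ++
      [PySem.List.pyGetD (pvFillB (pvEventsB label_vectors) (label_vectors.length : Int)) i 0])
    ++ input_vectors.drop ((label_vectors.length : Int)).toNat

-- ===== PRECONDITION & SPEC =====
-- Pre_ excludes exactly the inputs on which Python A raises IndexError:
-- label_vectors longer than input_vectors (vectors[i]), an empty states row
-- (states[0]), or a one-element row not starting with 1 (states[1]).
def Pre_generate_device_feature_vectors (input_vectors : List (List Int)) (label_vectors : List (List Int)) : Prop :=
  label_vectors.length ≤ input_vectors.length ∧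
  ∀ states ∈ label_vectors, states ≠ [] ∧ (states.getD 0 0 = 1 ∨ 2 ≤ states.length)
instance (input_vectors : List (List Int)) (label_vectors : List (List Int)) : Decidable (Pre_generate_device_feature_vectors input_vectors label_vectors) := by unfold Pre_generate_device_feature_vectors; infer_instance

def pvWitness_generate_device_feature_vectors : List (List Int) × List (List Int) :=
  ([[5], [7, 2], []], [[1, 0], [0, 1]])

def Spec_generate_device_feature_vectors (input_vectors : List (List Int)) (label_vectors : List (List Int)) (out : List (List Int)) : Prop := out = generate_device_feature_vectors_alt input_vectors label_vectors
instance (input_vectors : List (List Int)) (label_vectors : List (List Int)) (out : List (List Int)) : Decidable (Spec_generate_device_feature_vectors input_vectors label_vectors out) := by unfold Spec_generate_device_feature_vectors; infer_instance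

-- ===== CLAIM (what is proved, stated in full; the proofs are below) =====
def Claim_equal_generate_device_feature_vectors : Prop := ∀ (input_vectors : List (List Int)) (label_vectors : List (List Int)), Dom_generate_device_feature_vectors input_vectors label_vectors → Pre_generate_device_feature_vectors input_vectors label_vectors → Spec_generate_device_feature_vectors input_vectors label_vectors (generate_device_feature_vectors input_vectors label_vectors)

-- ===== LEMMAS AND PROOFS =====

-- the carried-state list as a structural recursion (proof-side characterisation)
def pvCarriedFrom (s : Int) : List (List Int) → List Int
  | [] => []
  | states :: rest => s :: pvCarriedFrom (pvUpdA s states) rest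

theorem pvCarriedFrom_length (s : Int) (lv : List (List Int)) :
    (pvCarriedFrom s lv).length = lv.length := by
  induction lv generalizing s with
  | nil => rfl
  | cons states rest ih => simp [pvCarriedFrom, ih]

-- the events list as a structural recursion (proof-side characterisation)
def pvEvRec (k : Int) : List (List Int) → List (Int × Int)
  | [] => []
  | states :: rest =>
      (if states.getD 0 0 = 1 then [(k, (0 : Int))]
       else if states.getD 1 0 = 1 then [(k, (1 : Int))] else []) ++ pvEvRec (k + 1) rest

theorem pvEventsB_eq (lv : List (List Int)) :
    ∀ (k : Int) (acc : List (Int × Int)),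
      ((PySem.List.enumerate lv k).foldl (fun acc p =>
        if p.2.getD 0 0 = 1 then acc ++ [(p.1, (0 : Int))]
        else if p.2.getD 1 0 = 1 then acc ++ [(p.1, (1 : Int))]
        else acc) acc) = acc ++ pvEvRec k lv := by
  induction lv with
  | nil => intro k acc; simp [PySem.List.enumerate_nil, pvEvRec]
  | cons states rest ih =>
      intro k acc
      rw [PySem.List.enumerate_cons, List.foldl_cons, ih]
      by_cases h0 : states[0]?.getD 0 = 1
      · simp [pvEvRec, List.getD_eq_getElem?_getD, h0]
      · by_cases h1 : states[1]?.getD 0 = 1 <;>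
          simp [pvEvRec, List.getD_eq_getElem?_getD, h0, h1]

-- run-length decoding of pvEvRec yields the carried-state sequence
theorem pvFill_evRec (lv : List (List Int)) :
    ∀ (k s : Int) (acc : List Int) (val : Int), s ≤ k →
      (let r := (pvEvRec k lv).foldl (fun (st : List Int × Int × Int) e =>
          (st.1 ++ List.replicate (e.1 + 1 - st.2.2).toNat st.2.1, e.2, e.1 + 1)) (acc, val, s);
        r.1 ++ List.replicate ((k + (lv.length : Int)) - r.2.2).toNat r.2.1)
      = acc ++ List.replicate (k - s).toNat val ++ pvCarriedFrom val lv := by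
  induction lv with
  | nil => intro k s acc val hs; simp [pvEvRec, pvCarriedFrom]
  | cons states rest ih =>
      intro k s acc val hs
      have hrep : ∀ (x : Int), List.replicate (k + 1 - s).toNat x
          = List.replicate (k - s).toNat x ++ [x] := by
        intro x
        have : (k + 1 - s).toNat = (k - s).toNat + 1 := by omega
        rw [this, List.replicate_succ']
      have hlen : k + ((states :: rest).length : Int) = (k + 1) + (rest.length : Int) := by
        simp only [List.length_cons]; push_cast; omega
      simp only [pvEvRec, List.getD_eq_getElem?_getD, hlen]
      by_cases h0 : states[0]?.getD 0 = 1
      · rw [if_pos h0]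
        simp only [List.singleton_append, List.foldl_cons]
        have := ih (k + 1) (k + 1) (acc ++ List.replicate (k + 1 - s).toNat val) 0 (le_refl _)
        rw [this]
        simp [pvCarriedFrom, pvUpdA, List.getD_eq_getElem?_getD, h0, hrep]
      · rw [if_neg h0]
        by_cases h1 : states[1]?.getD 0 = 1
        · rw [if_pos h1]
          simp only [List.singleton_append, List.foldl_cons]
          have := ih (k + 1) (k + 1) (acc ++ List.replicate (k + 1 - s).toNat val) 1 (le_refl _)
          rw [this]
          simp [pvCarriedFrom, pvUpdA, List.getD_eq_getElem?_getD, h0, h1, hrep]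
        · rw [if_neg h1]
          simp only [List.nil_append]
          have := ih (k + 1) s acc val (by omega)
          rw [this]
          simp [pvCarriedFrom, pvUpdA, List.getD_eq_getElem?_getD, h0, h1, hrep]

theorem pvCarriedB_eq (lv : List (List Int)) :
    pvFillB (pvEventsB lv) (lv.length : Int) = pvCarriedFrom 0 lv := by
  unfold pvFillB pvEventsB
  rw [pvEventsB_eq lv 0 []]
  have := pvFill_evRec lv 0 0 [] 0 (le_refl _)
  simpa using this

-- the pyRange comprehension over Int indices as a map over Nat range
theorem pvMapRange (iv : List (List Int)) (carried : List Int) (m : Nat) :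
    (PySem.List.pyRange 0 (m : Int) 1).map
      (fun i => PySem.List.pyGetD iv i [] ++ [PySem.List.pyGetD carried i 0])
    = (List.range m).map (fun k => iv.getD k [] ++ [carried.getD k 0]) := by
  rw [PySem.List.pyRange_zero_nat, List.map_map]
  apply List.map_congr_left
  intro k _
  simp [Function.comp, PySem.List.pyGetD_natCast]

-- the positional-append comprehension is zipWith when carried covers the prefix
theorem pvMap_range_eq_zipWith (iv : List (List Int)) (carried : List Int) (m : Nat)
    (h1 : m ≤ iv.length) (h2 : carried.length = m) :
    (List.range m).map (fun k => iv.getD k [] ++ [carried.getD k 0])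
      = List.zipWith (fun v c => v ++ [c]) iv carried ++ [] := by
  rw [List.append_nil]
  apply List.ext_getElem
  · simp; omega
  · intro i hi1 hi2
    simp only [List.getElem_map, List.getElem_range, List.getElem_zipWith]
    have hi : i < m := by simpa using hi1
    rw [List.getD_eq_getElem iv [] (by omega), List.getD_eq_getElem carried 0 (by omega)]

-- A's loop computes zipWith over the carried-state sequence, leaving the tail
theorem pvLoopA_zip (lv : List (List Int)) :
    ∀ (done rest : List (List Int)) (s : Int), lv.length ≤ rest.length →
      pvLoopA (done ++ rest) done.length s lv =
        done ++ (List.zipWith (fun v c => v ++ [c]) rest (pvCarriedFrom s lv))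
             ++ rest.drop lv.length := by
  induction lv with
  | nil => intro done rest s _; simp [pvLoopA, pvCarriedFrom]
  | cons states lv' ih =>
      intro done rest s hlen
      cases rest with
      | nil => simp at hlen
      | cons r rs =>
          simp only [pvLoopA]
          have hget : (done ++ r :: rs).getD done.length [] = r := by
            simp [List.getD_eq_getElem?_getD]
          have hset : (done ++ r :: rs).set done.length (r ++ [s]) =
              (done ++ [r ++ [s]]) ++ rs := by
            rw [List.set_append_right _ _ (le_refl _)]
            simp
          rw [hget, hset]
          have hlen' : lv'.length ≤ rs.length := by
            simpa using Nat.le_of_succ_le_succ (by simpa using hlen)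
          have := ih (done ++ [r ++ [s]]) rs (pvUpdA s states) hlen'
          simp only [List.length_append, List.length_cons, List.length_nil] at this ⊢
          simpa [pvCarriedFrom, List.append_assoc] using this

-- ===== VERDICT (by name: the statement is the Claim_ definition above) =====
theorem generate_device_feature_vectors_spec : Claim_equal_generate_device_feature_vectors := by
  intro iv lv _ hpre
  unfold Spec_generate_device_feature_vectors generate_device_feature_vectors generate_device_feature_vectors_alt
  rw [pvCarriedB_eq lv, pvMapRange iv (pvCarriedFrom 0 lv) lv.length,
    pvMap_range_eq_zipWith iv (pvCarriedFrom 0 lv) lv.length hpre.1 (pvCarriedFrom_length 0 lv)]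
  have hA := pvLoopA_zip lv [] iv 0 hpre.1
  simp only [List.nil_append, List.length_nil] at hA
  rw [hA]
  simp
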